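-- pv_equiv track=rewrite | github.com/trac3er00/OMG | tools/session_snapshot.py | detect_merge_conflicts
-- ===== SOURCE A (Python) =====
-- from typing import Any, Dict, List, Optional
--
-- def detect_merge_conflicts(
--     source_state: Dict[str, Any], target_state: Dict[str, Any]
-- ) -> List[Dict[str, Any]]:
--     """Compare two state dicts and find keys where both sides have different values.
--
--     Args:
--         source_state: State dict from the source branch
--         target_state: State dict from the target branch
--
--     Returns:
--         List of conflict dicts with keys: key, source_value, target_value, conflict_type.
--         conflict_type is "value_conflict" when both sides changed the same key
--         to different values.
--     """
--     conflicts: List[Dict[str, Any]] = []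
--     # Find keys present in both dicts with different values
--     common_keys = set(source_state.keys()) & set(target_state.keys())
--     for key in sorted(common_keys):
--         source_val = source_state[key]
--         target_val = target_state[key]
--         if source_val != target_val:
--             conflicts.append({
--                 "key": key,
--                 "source_value": source_val,
--                 "target_value": target_val,
--                 "conflict_type": "value_conflict",
--             })
--     return conflicts
-- ===== SOURCE B (Python) =====
-- def detect_merge_conflicts(source_state, target_state):
--     """Sort both item lists by key and walk them with a two-pointer merge join:
--     conflicts come out already in key order, with no set intersection,
--     no per-key dict lookup and no final sort."""
--     src = sorted(source_state.items(), key=lambda kv: kv[0])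
--     tgt = sorted(target_state.items(), key=lambda kv: kv[0])
--     conflicts = []
--     i = j = 0
--     while i < len(src) and j < len(tgt):
--         ks, vs = src[i]
--         kt, vt = tgt[j]
--         if ks < kt:
--             i += 1
--         elif kt < ks:
--             j += 1
--         else:
--             if vs != vt:
--                 conflicts.append({
--                     "key": ks,
--                     "source_value": vs,
--                     "target_value": vt,
--                     "conflict_type": "value_conflict",
--                 })
--             i += 1
--             j += 1
--     return conflicts
-- ===== Notes on version B (the rewrite author's own statement) =====
-- stated objective: alternative
-- what changed: B replaces the set-intersection-plus-sorted-key scan by a sort-merge join: it sorts both dicts' item lists by key and walks them with two pointers, emitting a conflict record whenever the heads carry the same key with different values, so conflicts come out already in key order with no set intersection, no per-key dict lookup and no final sort.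
import Mathlib
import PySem

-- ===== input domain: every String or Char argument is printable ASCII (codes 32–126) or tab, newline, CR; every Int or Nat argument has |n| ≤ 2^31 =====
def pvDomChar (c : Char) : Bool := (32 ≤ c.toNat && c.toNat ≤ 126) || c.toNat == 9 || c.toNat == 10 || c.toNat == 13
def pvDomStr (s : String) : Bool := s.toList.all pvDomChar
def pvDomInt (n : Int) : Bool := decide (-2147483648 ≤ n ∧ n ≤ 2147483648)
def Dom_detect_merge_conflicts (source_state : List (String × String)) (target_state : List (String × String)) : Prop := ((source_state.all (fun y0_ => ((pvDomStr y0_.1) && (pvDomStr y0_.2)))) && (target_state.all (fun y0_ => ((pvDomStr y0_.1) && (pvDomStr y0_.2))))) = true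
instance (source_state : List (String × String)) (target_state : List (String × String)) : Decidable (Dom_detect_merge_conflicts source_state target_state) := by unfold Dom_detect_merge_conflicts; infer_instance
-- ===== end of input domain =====

-- B replaces A's set intersection + sorted-key scan by a sort-merge join: both item lists are
-- sorted by key and walked with two pointers, emitting conflicts already in key order.


-- ===== PORT A =====
def detect_merge_conflicts (source_state : List (String × String)) (target_state : List (String × String)) : List (List (String × String)) :=
  -- common_keys = set(source_state.keys()) & set(target_state.keys())
  let common : PySem.Set String :=
    PySem.Set.inter (PySem.Set.ofList (source_state.map Prod.fst))
                    (PySem.Set.ofList (target_state.map Prod.fst))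
  -- for key in sorted(common_keys): …
  (PySem.List.sorted common (fun k => k)).foldl
    (fun conflicts key =>
      -- source_state[key] / target_state[key]: key is a common key, so the lookup always
      -- finds a pair and the .getD "" default is never taken
      let source_val := ((PySem.Dict.mk source_state).get? key).getD ""
      let target_val := ((PySem.Dict.mk target_state).get? key).getD ""
      if source_val ≠ target_val then
        conflicts ++ [[("key", key), ("source_value", source_val),
                       ("target_value", target_val), ("conflict_type", "value_conflict")]]
      else conflicts)
    []

-- ===== PORT B =====
-- the two-pointer while loop of Source B, transcribed as a two-list recursion
-- (advancing a pointer = dropping the head of that list)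
def pvMergeJoin : List (String × String) → List (String × String) → List (List (String × String))
  | [], _ => []
  | _ :: _, [] => []
  | (ks, vs) :: xs, (kt, vt) :: ys =>
    if ks < kt then pvMergeJoin xs ((kt, vt) :: ys)
    else if kt < ks then pvMergeJoin ((ks, vs) :: xs) ys
    else
      (if vs ≠ vt then
        [[("key", ks), ("source_value", vs),
          ("target_value", vt), ("conflict_type", "value_conflict")]]
       else []) ++ pvMergeJoin xs ys
termination_by xs ys => xs.length + ys.length
decreasing_by all_goals (simp; try omega)

def detect_merge_conflicts_alt (source_state : List (String × String)) (target_state : List (String × String)) : List (List (String × String)) :=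
  -- src = sorted(source_state.items(), key=lambda kv: kv[0]); likewise tgt
  let src := PySem.List.sorted source_state (fun kv => kv.1)
  let tgt := PySem.List.sorted target_state (fun kv => kv.1)
  pvMergeJoin src tgt

-- ===== PRECONDITION & SPEC =====
-- Pre_ excludes association lists with a duplicated key: those do not represent any Python dict
-- (a Python dict cannot hold the same key twice), so the ports' behaviour there is an accident
-- of the encoding, not of either Python program.
def Pre_detect_merge_conflicts (source_state : List (String × String)) (target_state : List (String × String)) : Prop :=
  (source_state.map Prod.fst).Nodup ∧ (target_state.map Prod.fst).Nodup
instance (source_state : List (String × String)) (target_state : List (String × String)) : Decidable (Pre_detect_merge_conflicts source_state target_state) := by unfold Pre_detect_merge_conflicts; infer_instance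
def pvWitness_detect_merge_conflicts : (List (String × String)) × (List (String × String)) :=
  ([("b", "1"), ("a", "2")], [("a", "3"), ("b", "1")])
def Spec_detect_merge_conflicts (source_state : List (String × String)) (target_state : List (String × String)) (out : List (List (String × String))) : Prop := out = detect_merge_conflicts_alt source_state target_state
instance (source_state : List (String × String)) (target_state : List (String × String)) (out : List (List (String × String))) : Decidable (Spec_detect_merge_conflicts source_state target_state out) := by unfold Spec_detect_merge_conflicts; infer_instance

-- ===== CLAIM (what is proved, stated in full; the proofs are below) =====
def Claim_equal_detect_merge_conflicts : Prop := ∀ (source_state : List (String × String)) (target_state : List (String × String)), Dom_detect_merge_conflicts source_state target_state → Pre_detect_merge_conflicts source_state target_state → Spec_detect_merge_conflicts source_state target_state (detect_merge_conflicts source_state target_state)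

-- ===== LEMMAS AND PROOFS =====

-- the conflict record built for key k (both sides build this very list when k conflicts)
def pvConf (s t : List (String × String)) (k : String) : List (String × String) :=
  [("key", k), ("source_value", ((PySem.Dict.mk s).get? k).getD ""),
   ("target_value", ((PySem.Dict.mk t).get? k).getD ""), ("conflict_type", "value_conflict")]

-- the combined condition: k is a target key and the two looked-up values differ
def pvQ (s t : List (String × String)) (k : String) : Bool :=
  ((PySem.Dict.mk t).get? k).isSome &&
    decide (¬ ((PySem.Dict.mk s).get? k).getD "" = ((PySem.Dict.mk t).get? k).getD "")

-- first-match lookup of a member pair, under unique keys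
theorem pv_get?_mk_of_mem_nodup {s : List (String × String)} {kv : String × String}
    (hn : (s.map Prod.fst).Nodup) (hm : kv ∈ s) :
    (PySem.Dict.mk s).get? kv.1 = some kv.2 := by
  induction s with
  | nil => cases hm
  | cons hd tl ih =>
    obtain ⟨k, v⟩ := hd
    rw [List.map_cons, List.nodup_cons] at hn
    rcases List.mem_cons.mp hm with h | h
    · rw [h]; simp [PySem.Dict.get?_mk_cons]
    · have hk : kv.1 ∈ tl.map Prod.fst := List.mem_map_of_mem h
      have hne : ¬ (k = kv.1) := fun he => hn.1 (by rw [he]; exact hk)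
      rw [PySem.Dict.get?_mk_cons, if_neg (by simpa using hne)]
      exact ih hn.2 h

theorem pv_isSome_iff_mem (t : List (String × String)) (k : String) :
    ((PySem.Dict.mk t).get? k).isSome = true ↔ k ∈ t.map Prod.fst := by
  simp [PySem.Dict.get?, List.find?_isSome]

theorem pv_get?_mk_eq_none_of_not_mem {t : List (String × String)} {k : String}
    (h : k ∉ t.map Prod.fst) : (PySem.Dict.mk t).get? k = none := by
  cases hg : (PySem.Dict.mk t).get? k with
  | none => rfl
  | some v => exact absurd ((pv_isSome_iff_mem t k).mp (by rw [hg]; rfl)) h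

-- membership in the target key set, as the isSome of the lookup
theorem pv_contains_eq_isSome (t : List (String × String)) (k : String) :
    (PySem.Set.ofList (t.map Prod.fst)).contains k = ((PySem.Dict.mk t).get? k).isSome := by
  by_cases h : k ∈ t.map Prod.fst
  · have h1 : (PySem.Set.ofList (t.map Prod.fst)).contains k = true := by
      simp [PySem.Set.contains, PySem.Set.mem_ofList, h]
    rw [h1, ((pv_isSome_iff_mem t k).mpr h)]
  · have h1 : (PySem.Set.ofList (t.map Prod.fst)).contains k = false := by
      simp [PySem.Set.contains, PySem.Set.mem_ofList, h]
    have h2 : ((PySem.Dict.mk t).get? k).isSome = false := by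
      rw [Bool.eq_false_iff]; intro hc; exact h ((pv_isSome_iff_mem t k).mp hc)
    rw [h1, h2]

theorem pv_mem_of_get?_mk_some {t : List (String × String)} {k v : String}
    (h : (PySem.Dict.mk t).get? k = some v) : (k, v) ∈ t := by
  induction t with
  | nil => simp [PySem.Dict.get?] at h
  | cons hd tl ih =>
    obtain ⟨k', v'⟩ := hd
    rw [PySem.Dict.get?_mk_cons] at h
    by_cases he : k' = k
    · rw [if_pos (by simpa using he)] at h
      exact List.mem_cons.mpr (Or.inl (by obtain rfl := he; simpa using h.symm))
    · rw [if_neg (by simpa using he)] at h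
      exact List.mem_cons.mpr (Or.inr (ih h))

-- first-match lookup is invariant under rearrangement when keys are unique
theorem pv_get?_mk_perm {l1 l2 : List (String × String)} (hp : l1.Perm l2)
    (hn : (l2.map Prod.fst).Nodup) (k : String) :
    (PySem.Dict.mk l1).get? k = (PySem.Dict.mk l2).get? k := by
  have hn1 : (l1.map Prod.fst).Nodup := ((hp.map Prod.fst).symm).nodup hn
  cases hg : (PySem.Dict.mk l2).get? k with
  | none =>
    refine pv_get?_mk_eq_none_of_not_mem (fun hm => ?_)
    have : k ∈ l2.map Prod.fst := (hp.map Prod.fst).mem_iff.mp hm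
    exact absurd ((pv_isSome_iff_mem l2 k).mpr this) (by rw [hg]; simp)
  | some v =>
    have hm : (k, v) ∈ l1 := hp.mem_iff.mpr (pv_mem_of_get?_mk_some hg)
    exact pv_get?_mk_of_mem_nodup hn1 hm

-- flatMap of an if-singleton is map over filter
theorem pv_flatMap_if_singleton {α β : Type} (l : List α) (p : α → Bool) (f : α → β) :
    l.flatMap (fun x => if p x then [f x] else []) = (l.filter p).map f := by
  induction l with
  | nil => rfl
  | cons hd tl ih =>
    by_cases h : p hd
    · simp [List.flatMap_cons, h, ih]
    · simp [List.flatMap_cons, h, ih]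

-- the merge join over key-strictly-increasing lists, as a flatMap over the left list
theorem pv_mergeJoin_eq_flatMap (xs ys : List (String × String))
    (hx : (xs.map Prod.fst).Pairwise (· < ·)) (hy : (ys.map Prod.fst).Pairwise (· < ·)) :
    pvMergeJoin xs ys = xs.flatMap (fun kv =>
      match (PySem.Dict.mk ys).get? kv.1 with
      | some w => if kv.2 ≠ w then
          [[("key", kv.1), ("source_value", kv.2),
            ("target_value", w), ("conflict_type", "value_conflict")]] else []
      | none => []) := by
  induction xs, ys using pvMergeJoin.induct with
  | case1 ys => simp [pvMergeJoin]
  | case2 kv xs =>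
    rw [pvMergeJoin]
    have : ∀ k, (PySem.Dict.mk ([] : List (String × String))).get? k = none := by
      intro k; rfl
    simp [this]
  | case3 ks vs xs kt vt ys hlt ih =>
    have hx2 := List.pairwise_cons.mp (show (ks :: xs.map Prod.fst).Pairwise (· < ·) by
      rwa [List.map_cons] at hx)
    rw [pvMergeJoin, if_pos hlt]
    rw [List.flatMap_cons]
    have hnone : (PySem.Dict.mk ((kt, vt) :: ys)).get? ks = none := by
      refine pv_get?_mk_eq_none_of_not_mem (fun hm => ?_)
      have hy2 := List.pairwise_cons.mp (show (kt :: ys.map Prod.fst).Pairwise (· < ·) by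
        rwa [List.map_cons] at hy)
      rw [List.map_cons, List.mem_cons] at hm
      rcases hm with h | h
      · exact absurd h.symm (ne_of_lt hlt).symm
      · exact absurd hlt (not_lt_of_gt (hy2.1 ks h))
    rw [hnone]
    rw [List.nil_append]
    exact ih hx2.2 hy
  | case4 ks vs xs kt vt ys hlt hgt ih =>
    have hx2 := List.pairwise_cons.mp (show (ks :: xs.map Prod.fst).Pairwise (· < ·) by
      rwa [List.map_cons] at hx)
    have hy2 := List.pairwise_cons.mp (show (kt :: ys.map Prod.fst).Pairwise (· < ·) by
      rwa [List.map_cons] at hy)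
    rw [pvMergeJoin, if_neg hlt, if_pos hgt]
    rw [ih hx hy2.2]
    rw [List.flatMap_def, List.flatMap_def]
    refine congrArg List.flatten (List.map_congr_left (fun kv hm => ?_))
    -- every key on the left is > kt, so the head (kt, vt) is never the match
    have hkgt : kt < kv.1 := by
      rcases List.mem_cons.mp hm with h | h
      · rw [h]; exact hgt
      · exact lt_trans hgt (hx2.1 kv.1 (List.mem_map_of_mem h))
    rw [PySem.Dict.get?_mk_cons, if_neg (by simpa using (ne_of_lt hkgt))]
  | case5 ks vs xs kt vt ys hlt hgt ih =>
    have hx2 := List.pairwise_cons.mp (show (ks :: xs.map Prod.fst).Pairwise (· < ·) by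
      rwa [List.map_cons] at hx)
    have hy2 := List.pairwise_cons.mp (show (kt :: ys.map Prod.fst).Pairwise (· < ·) by
      rwa [List.map_cons] at hy)
    have heq : ks = kt := le_antisymm (not_lt.mp hgt) (not_lt.mp hlt)
    rw [pvMergeJoin, if_neg hlt, if_neg hgt]
    rw [List.flatMap_cons]
    have hhead : (PySem.Dict.mk ((kt, vt) :: ys)).get? ks = some vt := by
      rw [PySem.Dict.get?_mk_cons, if_pos (by simpa using heq.symm)]
    rw [hhead]
    rw [ih hx2.2 hy2.2]
    refine congrArg₂ _ (by simp [heq]) ?_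
    rw [List.flatMap_def, List.flatMap_def]
    refine congrArg List.flatten (List.map_congr_left (fun kv hm => ?_))
    have hkgt : kt < kv.1 := heq ▸ hx2.1 kv.1 (List.mem_map_of_mem hm)
    rw [PySem.Dict.get?_mk_cons, if_neg (by simpa using (ne_of_lt hkgt))]

theorem detect_merge_conflicts_spec' (s t : List (String × String))
    (hpre : Pre_detect_merge_conflicts s t) :
    detect_merge_conflicts s t = detect_merge_conflicts_alt s t := by
  obtain ⟨hs, ht⟩ := hpre
  -- ---- A's loop as filter-then-map over the sorted common keys ----
  have hA : detect_merge_conflicts s t =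
      ((PySem.List.sorted (PySem.Set.inter (PySem.Set.ofList (s.map Prod.fst)) (PySem.Set.ofList (t.map Prod.fst))) (fun k => k)).filter
        (fun k => decide (¬ ((PySem.Dict.mk s).get? k).getD "" = ((PySem.Dict.mk t).get? k).getD ""))).map (pvConf s t) := by
    unfold detect_merge_conflicts
    rw [show (fun (conflicts : List (List (String × String))) (key : String) =>
          let source_val := ((PySem.Dict.mk s).get? key).getD ""
          let target_val := ((PySem.Dict.mk t).get? key).getD ""
          if source_val ≠ target_val then
            conflicts ++ [[("key", key), ("source_value", source_val),
                           ("target_value", target_val), ("conflict_type", "value_conflict")]]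
          else conflicts) =
        (fun acc k => if (fun k => decide (¬ ((PySem.Dict.mk s).get? k).getD "" = ((PySem.Dict.mk t).get? k).getD "")) k = true
                      then acc ++ [pvConf s t k] else acc) from by
      funext acc k
      by_cases h : ((PySem.Dict.mk s).get? k).getD "" = ((PySem.Dict.mk t).get? k).getD ""
      · simp [h]
      · simp [h, pvConf]]
    rw [PySem.List.foldl_append_if]
    rw [List.nil_append]
  -- the common-key list is the nodup source-key list filtered by target membership
  have hcommon : PySem.Set.inter (PySem.Set.ofList (s.map Prod.fst)) (PySem.Set.ofList (t.map Prod.fst)) =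
      (s.map Prod.fst).filter (fun k => ((PySem.Dict.mk t).get? k).isSome) := by
    show ((PySem.Set.ofList (s.map Prod.fst)).filter
        (fun k => (PySem.Set.ofList (t.map Prod.fst)).contains k)) = _
    rw [PySem.Set.ofList_eq_self_of_nodup _ hs]
    exact List.filter_congr (fun k _ => pv_contains_eq_isSome t k)
  -- ---- B: sorted item lists are key-strictly-increasing ----
  have hsrc_le : ((PySem.List.sorted s (fun kv : String × String => kv.1)).map Prod.fst).Pairwise (· ≤ ·) :=
    PySem.List.sorted_map_key_pairwise s (fun kv => kv.1)
  have hsrc_nd : ((PySem.List.sorted s (fun kv : String × String => kv.1)).map Prod.fst).Nodup :=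
    ((PySem.List.sorted_perm s (fun kv : String × String => kv.1) false).map Prod.fst).symm.nodup hs
  have hsrc_lt : ((PySem.List.sorted s (fun kv : String × String => kv.1)).map Prod.fst).Pairwise (· < ·) :=
    (hsrc_le.and hsrc_nd).imp (fun h => lt_of_le_of_ne h.1 h.2)
  have htgt_le : ((PySem.List.sorted t (fun kv : String × String => kv.1)).map Prod.fst).Pairwise (· ≤ ·) :=
    PySem.List.sorted_map_key_pairwise t (fun kv => kv.1)
  have htgt_nd : ((PySem.List.sorted t (fun kv : String × String => kv.1)).map Prod.fst).Nodup :=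
    ((PySem.List.sorted_perm t (fun kv : String × String => kv.1) false).map Prod.fst).symm.nodup ht
  have htgt_lt : ((PySem.List.sorted t (fun kv : String × String => kv.1)).map Prod.fst).Pairwise (· < ·) :=
    (htgt_le.and htgt_nd).imp (fun h => lt_of_le_of_ne h.1 h.2)
  -- ---- B as a flatMap over the sorted source pairs ----
  have hB : detect_merge_conflicts_alt s t =
      (PySem.List.sorted s (fun kv : String × String => kv.1)).flatMap (fun kv =>
        if pvQ s t kv.1 then [pvConf s t kv.1] else []) := by
    show pvMergeJoin (PySem.List.sorted s (fun kv : String × String => kv.1))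
        (PySem.List.sorted t (fun kv : String × String => kv.1)) = _
    rw [pv_mergeJoin_eq_flatMap _ _ hsrc_lt htgt_lt]
    rw [List.flatMap_def, List.flatMap_def]
    refine congrArg List.flatten (List.map_congr_left (fun kv hm => ?_))
    have hmem : kv ∈ s := (PySem.List.sorted_perm s (fun kv : String × String => kv.1) false).mem_iff.mp hm
    have hsv : (PySem.Dict.mk s).get? kv.1 = some kv.2 := pv_get?_mk_of_mem_nodup hs hmem
    have htv : (PySem.Dict.mk (PySem.List.sorted t (fun kv : String × String => kv.1))).get? kv.1 =
        (PySem.Dict.mk t).get? kv.1 :=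
      pv_get?_mk_perm (PySem.List.sorted_perm t (fun kv : String × String => kv.1) false) ht kv.1
    rw [htv]
    cases hg : (PySem.Dict.mk t).get? kv.1 with
    | none => simp [pvQ, hg]
    | some w =>
      by_cases h : kv.2 = w
      · simp [pvQ, hg, hsv, h]
      · simp [pvQ, pvConf, hg, hsv, h]
  -- ---- B's flatMap as map-over-filter of the sorted source keys ----
  have hB2 : detect_merge_conflicts_alt s t =
      (((PySem.List.sorted s (fun kv : String × String => kv.1)).map Prod.fst).filter
        (fun k => pvQ s t k)).map (pvConf s t) := by
    rw [hB]
    rw [show ((PySem.List.sorted s (fun kv : String × String => kv.1)).flatMap (fun kv =>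
          if pvQ s t kv.1 then [pvConf s t kv.1] else [])) =
        (((PySem.List.sorted s (fun kv : String × String => kv.1)).map Prod.fst).flatMap (fun k =>
          if pvQ s t k then [pvConf s t k] else [])) from by
      rw [List.flatMap_def, List.flatMap_def, List.map_map]; rfl]
    exact pv_flatMap_if_singleton _ _ _
  -- ---- the sorted source keys ARE sorted(s.keys) ----
  have hkeys : (PySem.List.sorted s (fun kv : String × String => kv.1)).map Prod.fst =
      PySem.List.sorted (s.map Prod.fst) (fun k => k) := by
    exact (PySem.List.sorted_eq_of_perm_of_pairwise_lt (s.map Prod.fst) _ (fun k => k)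
      ((PySem.List.sorted_perm s (fun kv : String × String => kv.1) false).map Prod.fst)
      hsrc_lt).symm
  -- ---- sorting commutes with the membership filter (both strictly increasing) ----
  have hsk_le : (PySem.List.sorted (s.map Prod.fst) (fun k => k)).Pairwise (· ≤ ·) :=
    PySem.List.sorted_pairwise (s.map Prod.fst) (fun k => k)
  have hsk_nd : (PySem.List.sorted (s.map Prod.fst) (fun k => k)).Nodup :=
    (PySem.List.sorted_perm (s.map Prod.fst) (fun k => k) false).symm.nodup hs
  have hsk_lt : (PySem.List.sorted (s.map Prod.fst) (fun k => k)).Pairwise (· < ·) :=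
    (hsk_le.and hsk_nd).imp (fun h => lt_of_le_of_ne h.1 h.2)
  have hcomm : PySem.List.sorted ((s.map Prod.fst).filter (fun k => ((PySem.Dict.mk t).get? k).isSome)) (fun k => k) =
      (PySem.List.sorted (s.map Prod.fst) (fun k => k)).filter (fun k => ((PySem.Dict.mk t).get? k).isSome) := by
    exact PySem.List.sorted_eq_of_perm_of_pairwise_lt _ _ (fun k => k)
      ((PySem.List.sorted_perm (s.map Prod.fst) (fun k => k) false).filter _)
      (List.Pairwise.sublist List.filter_sublist hsk_lt)
  -- ---- conclude ----
  rw [hA, hcommon, hB2, hkeys, hcomm, List.filter_filter]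
  refine congrArg _ (List.filter_congr (fun k _ => ?_))
  simp only [pvQ]
  cases ((PySem.Dict.mk t).get? k).isSome
  · simp
  · simp

-- ===== VERDICT (by name: the statement is the Claim_ definition above) =====
theorem detect_merge_conflicts_spec : Claim_equal_detect_merge_conflicts := by
  intro s t _ hpre
  unfold Spec_detect_merge_conflicts
  exact detect_merge_conflicts_spec' s t hpre
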